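-- pv_equiv track=rewrite | github.com/Danondso/tonal-hortator | tonal_hortator/core/playlist_generator.py | _group_tracks_by_artist
-- ===== SOURCE A (Python) =====
-- from typing import Any, Dict, List, Optional
--
-- def _group_tracks_by_artist(tracks: List[Dict[str, Any]]) -> dict[str, list]:
--     """Group tracks by artist for deduplication"""
--     artist_groups: dict[str, list] = {}
--     for track in tracks:
--         artist = track.get("artist", "").strip().lower()
--         if artist:
--             if artist not in artist_groups:
--                 artist_groups[artist] = []
--             artist_groups[artist].append(track)
--     return artist_groups
-- ===== SOURCE B (Python) =====
-- from typing import Any, Dict, List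
--
-- def _group_tracks_by_artist(tracks: List[Dict[str, Any]]) -> dict[str, list]:
--     """Group tracks by artist: list the distinct normalized artists in first-seen
--     order, then gather each artist's tracks with one filter pass per artist."""
--     key = lambda t: t.get("artist", "").strip().lower()
--     artists = dict.fromkeys(k for k in map(key, tracks) if k)
--     return {a: [t for t in tracks if key(t) == a] for a in artists}
-- ===== Notes on version B (the rewrite author's own statement) =====
-- stated objective: alternative
-- what changed: Instead of A's incremental hash-bucketing (one dict of lists grown track by track), B first computes the distinct normalized artist keys in first-seen order with dict.fromkeys and then builds each group with a separate filter pass over the track list.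
import Mathlib
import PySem

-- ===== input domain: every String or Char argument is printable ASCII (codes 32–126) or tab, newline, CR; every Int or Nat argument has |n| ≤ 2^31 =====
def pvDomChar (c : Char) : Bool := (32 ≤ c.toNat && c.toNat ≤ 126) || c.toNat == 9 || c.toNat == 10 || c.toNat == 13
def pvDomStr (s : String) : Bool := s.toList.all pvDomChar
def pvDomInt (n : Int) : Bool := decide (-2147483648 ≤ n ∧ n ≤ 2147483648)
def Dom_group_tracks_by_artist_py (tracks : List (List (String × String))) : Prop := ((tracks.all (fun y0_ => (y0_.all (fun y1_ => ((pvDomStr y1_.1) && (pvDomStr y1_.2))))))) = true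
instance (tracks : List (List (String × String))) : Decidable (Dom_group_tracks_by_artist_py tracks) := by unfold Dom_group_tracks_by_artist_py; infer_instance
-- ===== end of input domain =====

set_option maxHeartbeats 1000000

-- B replaces A's incremental dict-of-lists bucketing by a dedup of the normalized
-- artist keys followed by one filter pass per key (alternative decomposition).

-- shared key expression: track.get("artist", "").strip().lower()
def pvKey (track : List (String × String)) : String :=
  PySem.Str.lower (PySem.Str.strip (PySem.Dict.getD (PySem.Dict.mk track) "artist" ""))

-- ===== PORT A =====
def group_tracks_by_artist_py (tracks : List (List (String × String))) : List (String × List (List (String × String))) :=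
  (tracks.foldl
    (fun artist_groups track =>
      let artist := pvKey track
      if artist ≠ "" then
        (if artist_groups.contains artist then artist_groups
         else artist_groups.insert artist []).modify artist [] (fun g => g ++ [track])
      else artist_groups)
    PySem.Dict.empty).items

-- ===== PORT B =====
def group_tracks_by_artist_py_alt (tracks : List (List (String × String))) : List (String × List (List (String × String))) :=
  let artists := PySem.List.dedup ((tracks.map pvKey).filter (fun k => k ≠ ""))
  artists.map (fun a => (a, tracks.filter (fun t => pvKey t == a)))

-- ===== PRECONDITION & SPEC =====
def Spec_group_tracks_by_artist_py (tracks : List (List (String × String))) (out : List (String × List (List (String × String)))) : Prop := out = group_tracks_by_artist_py_alt tracks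
instance (tracks : List (List (String × String))) (out : List (String × List (List (String × String)))) : Decidable (Spec_group_tracks_by_artist_py tracks out) := by unfold Spec_group_tracks_by_artist_py; infer_instance

-- ===== CLAIM (what is proved, stated in full; the proofs are below) =====
def Claim_equal_group_tracks_by_artist_py : Prop := ∀ (tracks : List (List (String × String))), Dom_group_tracks_by_artist_py tracks → Spec_group_tracks_by_artist_py tracks (group_tracks_by_artist_py tracks)

-- ===== LEMMAS AND PROOFS =====

-- Python's "if artist not in d: d[artist] = []" followed by "d[artist].append(track)"
-- is the single dict update d.modify artist [] (· ++ [track])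
theorem pv_insert_modify (d : PySem.Dict String (List (List (String × String)))) (a : String)
    (f : List (List (String × String)) → List (List (String × String))) :
    ((if d.contains a then d else d.insert a []).modify a [] f) = d.modify a [] f := by
  cases h : d.contains a with
  | true => simp
  | false =>
    simp only [Bool.false_eq_true, if_false, PySem.Dict.modify,
      PySem.Dict.getD_insert_self, PySem.Dict.insert_insert_self,
      PySem.Dict.getD_of_not_contains d [] h]

-- A's loop body, as a function, equals the guarded plain modify
theorem pv_step_funext :
    (fun (artist_groups : PySem.Dict String (List (List (String × String)))) track =>
      let artist := pvKey track
      if artist ≠ "" then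
        (if artist_groups.contains artist then artist_groups
         else artist_groups.insert artist []).modify artist [] (fun g => g ++ [track])
      else artist_groups)
    = (fun (d : PySem.Dict String (List (List (String × String)))) t =>
        if pvKey t ≠ "" then d.modify (pvKey t) [] (fun g => g ++ [t]) else d) := by
  funext d t
  by_cases h : pvKey t = ""
  · simp only [h, ne_eq, not_true_eq_false, if_false]
  · simp only [ne_eq, h, not_false_eq_true, if_true, pv_insert_modify]

-- the guarded fold is the fold over the pre-filtered list
theorem pv_fold_filter (l : List (List (String × String)))
    (d : PySem.Dict String (List (List (String × String)))) :
    l.foldl (fun d t => if pvKey t ≠ "" then d.modify (pvKey t) [] (fun g => g ++ [t]) else d) d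
    = (l.filter (fun t => pvKey t ≠ "")).foldl
        (fun d t => d.modify (pvKey t) [] (fun g => g ++ [t])) d := by
  induction l generalizing d with
  | nil => simp only [List.foldl_nil, List.filter_nil]
  | cons t ts ih =>
    simp only [List.foldl_cons, List.filter_cons]
    by_cases h : pvKey t = ""
    · simp only [h, ne_eq, not_true_eq_false, if_false, decide_false, Bool.false_eq_true, ih]
    · simp only [ne_eq, h, not_false_eq_true, if_true, decide_true, ih, List.foldl_cons]

-- each bucket of the grouping fold is a filter of its input list
theorem pv_getD (l : List (List (String × String))) (k : String) :
    (l.foldl (fun d t => d.modify (pvKey t) [] (fun g => g ++ [t])) PySem.Dict.empty).getD k []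
      = l.filter (fun t => pvKey t == k) := by
  have h := PySem.Dict.getD_foldl_modify_append (l.map (fun t => (pvKey t, t))) PySem.Dict.empty k
  rw [List.foldl_map, List.filter_map] at h
  rw [h]
  simp [Function.comp_def]

-- for a non-empty key, pre-filtering the empty-key tracks away changes nothing
theorem pv_filter_filter (tracks : List (List (String × String))) (a : String) (ha : a ≠ "") :
    (tracks.filter (fun t => pvKey t ≠ "")).filter (fun t => pvKey t == a)
      = tracks.filter (fun t => pvKey t == a) := by
  rw [List.filter_filter]
  apply List.filter_congr
  intro t _
  by_cases h : pvKey t = a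
  · simp [h, ha]
  · simp [h]

-- any dict with B's keys and per-key buckets has B's items list
theorem pv_items (tracks : List (List (String × String)))
    (D : PySem.Dict String (List (List (String × String))))
    (hk : D.keys = PySem.Set.ofList ((tracks.map pvKey).filter (fun k => k ≠ "")))
    (hnd : D.keys.Nodup)
    (hg : ∀ k, k ≠ "" → D.getD k [] = tracks.filter (fun t => pvKey t == k)) :
    D.items = group_tracks_by_artist_py_alt tracks := by
  rw [PySem.Dict.items_eq_map_keys D hnd [], hk]
  unfold group_tracks_by_artist_py_alt
  rw [PySem.List.dedup_eq_ofList]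
  apply List.map_congr_left
  intro a ha
  rw [PySem.Set.mem_ofList] at ha
  have hne : a ≠ "" := by
    have := List.of_mem_filter ha
    simpa using this
  rw [hg a hne]

theorem py_eq (tracks : List (List (String × String))) :
    group_tracks_by_artist_py tracks = group_tracks_by_artist_py_alt tracks := by
  unfold group_tracks_by_artist_py
  rw [pv_step_funext, pv_fold_filter]
  apply pv_items
  · rw [PySem.Dict.keys_foldl_modify_key _ pvKey [] (fun _ t => fun g => g ++ [t])]
    rw [PySem.Dict.keys_empty]
    rw [PySem.Set.update_nil_left]
    rw [List.filter_map]
    simp [Function.comp_def]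
  · exact PySem.Dict.nodup_keys_foldl_modify_key _ pvKey [] (fun _ t => fun g => g ++ [t]) _
      PySem.Dict.nodup_keys_empty
  · intro k hk'
    rw [pv_getD]
    exact pv_filter_filter tracks k hk'

-- ===== VERDICT (by name: the statement is the Claim_ definition above) =====
theorem group_tracks_by_artist_py_spec : Claim_equal_group_tracks_by_artist_py := by
  intro tracks _
  show group_tracks_by_artist_py tracks = group_tracks_by_artist_py_alt tracks
  exact py_eq tracks
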